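-- pv_equiv track=rewrite | github.com/fouriersky/vasp_projected_bandplot | src/vasp_bandplot/io/read.py | atom_type_index_ranges
-- ===== SOURCE A (Python) =====
-- def atom_type_index_ranges(atom_numbers):
--     ranges = []
--     start = 1
--     for cnt in atom_numbers:
--         end = start + cnt - 1
--         ranges.append((start, end))
--         start = end + 1
--     return ranges
-- ===== SOURCE B (Python) =====
-- def atom_type_index_ranges(atom_numbers):
--     # Each range is computed independently by a closed formula over the input:
--     # the i-th range starts right after the first i counts and ends after i+1 counts.
--     return [(sum(atom_numbers[:i]) + 1, sum(atom_numbers[:i + 1]))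
--             for i in range(len(atom_numbers))]
-- ===== Notes on version B (the rewrite author's own statement) =====
-- stated objective: alternative
-- what changed: Replaces the stateful running-accumulator loop with a stateless per-index closed formula: each range i is computed independently as (sum(xs[:i])+1, sum(xs[:i+1])), with no carried state between iterations (trades O(n) for O(n^2) in exchange for random-access, order-independent computation of each entry).
import Mathlib
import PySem

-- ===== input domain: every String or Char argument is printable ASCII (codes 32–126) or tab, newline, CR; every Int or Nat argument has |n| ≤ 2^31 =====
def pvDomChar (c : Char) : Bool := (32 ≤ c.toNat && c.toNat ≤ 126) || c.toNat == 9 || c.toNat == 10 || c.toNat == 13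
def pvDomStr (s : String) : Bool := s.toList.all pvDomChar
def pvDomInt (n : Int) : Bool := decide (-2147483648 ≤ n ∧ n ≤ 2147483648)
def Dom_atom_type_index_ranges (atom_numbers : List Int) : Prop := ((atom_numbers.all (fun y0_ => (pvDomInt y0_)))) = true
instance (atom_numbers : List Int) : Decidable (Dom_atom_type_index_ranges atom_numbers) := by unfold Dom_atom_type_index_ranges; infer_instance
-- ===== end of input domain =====

-- B replaces A's stateful running-accumulator loop with a stateless per-index closed formula (start = sum of first i counts + 1, end = sum of first i+1 counts); alternative decomposition, O(n^2) vs A's O(n).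


-- ===== PORT A =====
-- literal port of A: fold over atom_numbers carrying (ranges, start)
def atom_type_index_ranges (atom_numbers : List Int) : List (Int × Int) :=
  (atom_numbers.foldl
    (fun (st : List (Int × Int) × Int) cnt =>
      let e := st.2 + cnt - 1
      (st.1 ++ [(st.2, e)], e + 1))
    ([], 1)).1

-- ===== PORT B =====
-- [(sum(xs[:i]) + 1, sum(xs[:i+1])) for i in range(len(xs))]
-- xs[:i] with 0 ≤ i is List.take i; sum(...) is List.sum; range(len(xs)) is List.range.
def atom_type_index_ranges_alt (atom_numbers : List Int) : List (Int × Int) :=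
  (List.range atom_numbers.length).map
    (fun i => ((atom_numbers.take i).sum + 1, (atom_numbers.take (i + 1)).sum))

-- ===== PRECONDITION & SPEC =====
def Spec_atom_type_index_ranges (atom_numbers : List Int) (out : List (Int × Int)) : Prop := out = atom_type_index_ranges_alt atom_numbers
instance (atom_numbers : List Int) (out : List (Int × Int)) : Decidable (Spec_atom_type_index_ranges atom_numbers out) := by unfold Spec_atom_type_index_ranges; infer_instance

-- ===== CLAIM (what is proved, stated in full; the proofs are below) =====
def Claim_equal_atom_type_index_ranges : Prop := ∀ (atom_numbers : List Int), Dom_atom_type_index_ranges atom_numbers → Spec_atom_type_index_ranges atom_numbers (atom_type_index_ranges atom_numbers)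

-- ===== LEMMAS AND PROOFS =====

-- canonical recursion A's fold is reduced to
def pvGo : Int → List Int → List (Int × Int)
  | _, [] => []
  | s, c :: cs => (s, s + c - 1) :: pvGo (s + c) cs

theorem pvA_foldl (l : List Int) : ∀ (acc : List (Int × Int)) (s : Int),
    (l.foldl
      (fun (st : List (Int × Int) × Int) cnt =>
        let e := st.2 + cnt - 1
        (st.1 ++ [(st.2, e)], e + 1))
      (acc, s)).1 = acc ++ pvGo s l := by
  induction l with
  | nil => intro acc s; simp [pvGo]
  | cons c cs ih =>
    intro acc s
    simp only [List.foldl_cons, pvGo]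
    rw [show s + c - 1 + 1 = s + c by ring, ih]
    simp

theorem pvGo_eq_map (l : List Int) : ∀ (s : Int),
    pvGo s l = (List.range l.length).map
      (fun i => (s + (l.take i).sum, s + (l.take (i + 1)).sum - 1)) := by
  induction l with
  | nil => intro s; simp [pvGo]
  | cons c cs ih =>
    intro s
    simp only [pvGo, List.length_cons, List.range_succ_eq_map, List.map_cons, List.map_map]
    congr 1
    · simp
    · rw [ih (s + c)]
      apply List.map_congr_left
      intro i _
      simp only [Function.comp, Nat.succ_eq_add_one, List.take_succ_cons, List.sum_cons,
        Prod.mk.injEq]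
      constructor <;> ring

-- ===== VERDICT (by name: the statement is the Claim_ definition above) =====
theorem atom_type_index_ranges_spec : Claim_equal_atom_type_index_ranges := by
  intro l _
  show _ = _
  unfold atom_type_index_ranges atom_type_index_ranges_alt
  rw [pvA_foldl l [] 1, List.nil_append, pvGo_eq_map l 1]
  apply List.map_congr_left
  intro i _
  exact Prod.ext_iff.mpr ⟨by omega, by omega⟩
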